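-- pv_equiv track=rewrite | github.com/emilschleder/DaMorph | _4_Evaluation/tokenizer.py | compute_target_spans
-- ===== SOURCE A (Python) =====
-- def compute_target_spans(morphemes):
--     spans_set = set()
--     start = 0
--     for morpheme in morphemes:
--         morpheme = morpheme.replace('-', '')
--         stop = start + len(morpheme)
--         spans_set.add((start, stop))
--         start = stop
--     return spans_set
-- ===== SOURCE B (Python) =====
-- def compute_target_spans(morphemes):
--     def solve(segment):
--         if not segment:
--             return set(), 0
--         if len(segment) == 1:
--             n = len(segment[0].replace('-', ''))
--             return {(0, n)}, n
--         mid = len(segment) // 2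
--         left, ln = solve(segment[:mid])
--         right, rn = solve(segment[mid:])
--         return left | {(a + ln, b + ln) for a, b in right}, ln + rn
--     return solve(morphemes)[0]
-- ===== Notes on version B (the rewrite author's own statement) =====
-- stated objective: alternative
-- what changed: B replaces A's single left-to-right pass with a running start offset by a divide-and-conquer: it recursively computes the span sets of the two halves independently at base offset 0 and merges them by shifting the right half's spans by the left half's total cleaned length.
import Mathlib
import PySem

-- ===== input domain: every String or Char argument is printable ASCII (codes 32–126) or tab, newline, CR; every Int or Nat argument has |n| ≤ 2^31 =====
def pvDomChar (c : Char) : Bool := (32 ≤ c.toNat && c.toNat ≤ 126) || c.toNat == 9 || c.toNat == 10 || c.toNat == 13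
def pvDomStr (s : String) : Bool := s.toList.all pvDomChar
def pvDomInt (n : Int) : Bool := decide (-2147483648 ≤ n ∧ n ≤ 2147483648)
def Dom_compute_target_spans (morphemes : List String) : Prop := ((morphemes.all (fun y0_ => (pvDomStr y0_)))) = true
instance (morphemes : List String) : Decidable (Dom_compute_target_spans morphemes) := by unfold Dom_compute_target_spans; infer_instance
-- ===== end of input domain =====

-- B computes the span set by divide-and-conquer (halves solved at base 0, right half shifted by the
-- left half's total cleaned length) instead of A's single pass with a running start; same value (alternative, not faster).

-- ===== PORT A =====
-- running (set, start) accumulator, one pass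
def compute_target_spans (morphemes : List String) : List (Int × Int) :=
  (morphemes.foldl
    (fun (st : PySem.Set (Int × Int) × Int) morpheme =>
      let m := PySem.Str.replace morpheme "-" ""
      let stop := st.2 + PySem.Str.len m
      (PySem.Set.add st.1 (st.2, stop), stop))
    (PySem.Set.empty, 0)).1

-- ===== PORT B =====
-- cleaned length of one morpheme: len(m.replace('-',''))
def pvClen (m : String) : Int := PySem.Str.len (PySem.Str.replace m "-" "")

-- solve(segment) of Source B: (span set at base 0, total cleaned length).
-- fuel (= initial list length) only makes the halving recursion structural; it is never exhausted.
def pvSolve : Nat → List String → PySem.Set (Int × Int) × Int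
  | _, [] => (PySem.Set.empty, 0)
  | _, [m] => ((PySem.Set.ofList [(0, pvClen m)]), pvClen m)
  | 0, _ :: _ :: _ => (PySem.Set.empty, 0)
  | fuel + 1, a :: b :: rest =>
      let mid := (a :: b :: rest).length / 2
      let L := pvSolve fuel ((a :: b :: rest).take mid)
      let R := pvSolve fuel ((a :: b :: rest).drop mid)
      (PySem.Set.union L.1 (R.1.map (fun p => (p.1 + L.2, p.2 + L.2))), L.2 + R.2)

def compute_target_spans_alt (morphemes : List String) : List (Int × Int) :=
  (pvSolve morphemes.length morphemes).1

-- ===== PRECONDITION & SPEC =====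
def Spec_compute_target_spans (morphemes : List String) (out : List (Int × Int)) : Prop := out = compute_target_spans_alt morphemes
instance (morphemes : List String) (out : List (Int × Int)) : Decidable (Spec_compute_target_spans morphemes out) := by unfold Spec_compute_target_spans; infer_instance

-- ===== CLAIM =====
def Claim_equal_compute_target_spans : Prop := ∀ (morphemes : List String), Dom_compute_target_spans morphemes → Spec_compute_target_spans morphemes (compute_target_spans morphemes)

-- ===== LEMMAS AND PROOFS =====

-- the list of spans of l starting at offset t, in order
def pvSpans : List String → Int → List (Int × Int)
  | [], _ => []
  | m :: l, t => (t, t + pvClen m) :: pvSpans l (t + pvClen m)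

def pvTot (l : List String) : Int := (l.map pvClen).sum

lemma pvA_foldl (l : List String) (s : PySem.Set (Int × Int)) (t : Int) :
    (l.foldl
      (fun (st : PySem.Set (Int × Int) × Int) morpheme =>
        let m := PySem.Str.replace morpheme "-" ""
        let stop := st.2 + PySem.Str.len m
        (PySem.Set.add st.1 (st.2, stop), stop))
      (s, t)).1
    = (pvSpans l t).foldl PySem.Set.add s := by
  induction l generalizing s t with
  | nil => simp [pvSpans]
  | cons m l ih => simp only [List.foldl, pvSpans, pvClen]; exact ih _ _

lemma pvSpans_shift (l : List String) (a b : Int) :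
    pvSpans l (a + b) = (pvSpans l b).map (fun p => (p.1 + a, p.2 + a)) := by
  induction l generalizing b with
  | nil => simp [pvSpans]
  | cons m l ih =>
    simp only [pvSpans, List.map_cons, List.cons.injEq, Prod.mk.injEq]
    refine ⟨⟨by ring, by ring⟩, ?_⟩
    rw [show a + b + pvClen m = a + (b + pvClen m) from by ring, ih]

lemma pvSpans_append (l1 l2 : List String) (t : Int) :
    pvSpans (l1 ++ l2) t = pvSpans l1 t ++ pvSpans l2 (t + pvTot l1) := by
  induction l1 generalizing t with
  | nil => simp [pvSpans, pvTot]
  | cons m l ih =>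
    simp only [List.cons_append, pvSpans, ih, pvTot, List.map_cons, List.sum_cons]
    rw [show t + (pvClen m + (l.map pvClen).sum) = t + pvClen m + (l.map pvClen).sum from by ring]

lemma pvMap_discard {α β : Type} [BEq α] [LawfulBEq α] [BEq β] [LawfulBEq β] (f : α → β)
    (hf : Function.Injective f) (s : List α) (x : α) :
    (PySem.Set.discard s x).map f = PySem.Set.discard (s.map f) (f x) := by
  induction s with
  | nil => simp [PySem.Set.discard]
  | cons a s ih =>
    by_cases h : a = x
    · simp [PySem.Set.discard, h]
      simpa [PySem.Set.discard] using ih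
    · have h2 : ¬ f a = f x := fun hc => h (hf hc)
      simp [PySem.Set.discard, h, h2]
      simpa [PySem.Set.discard] using ih

lemma pvMap_ofList {α β : Type} [BEq α] [LawfulBEq α] [BEq β] [LawfulBEq β] (f : α → β)
    (hf : Function.Injective f) (s : List α) :
    PySem.Set.ofList (s.map f) = (PySem.Set.ofList s).map f := by
  induction s with
  | nil => simp
  | cons a s ih =>
    simp only [List.map_cons, PySem.Set.ofList_cons, ih, pvMap_discard f hf]

lemma pvUpdate_ofList_right {α : Type} [BEq α] [LawfulBEq α] (s t : List α) :
    PySem.Set.update s (PySem.Set.ofList t) = PySem.Set.update s t := by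
  rw [PySem.Set.update_eq_append_filter, PySem.Set.update_eq_append_filter,
    PySem.Set.ofList_ofList]

lemma pvTot_take_drop (n : Nat) (l : List String) :
    pvTot (l.take n) + pvTot (l.drop n) = pvTot l := by
  rw [pvTot, pvTot, pvTot, ← List.sum_append, ← List.map_append, List.take_append_drop]

lemma pvMerge (l1 l2 : List String) :
    PySem.Set.union (PySem.Set.ofList (pvSpans l1 0))
      ((PySem.Set.ofList (pvSpans l2 0)).map (fun p => (p.1 + pvTot l1, p.2 + pvTot l1)))
    = PySem.Set.ofList (pvSpans (l1 ++ l2) 0) := by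
  have hshift : Function.Injective (fun p : Int × Int => (p.1 + pvTot l1, p.2 + pvTot l1)) := by
    intro p q h
    simp only [Prod.mk.injEq] at h
    exact Prod.ext (by omega) (by omega)
  rw [← pvMap_ofList _ hshift, PySem.Set.union, pvUpdate_ofList_right, ← PySem.Set.ofList_append]
  congr 1
  rw [pvSpans_append, show (0 : Int) + pvTot l1 = pvTot l1 + 0 from by ring, pvSpans_shift]

-- the correctness invariant of Source B's solve
lemma pvSolve_eq (fuel : Nat) (l : List String) (h : l.length ≤ fuel) :
    pvSolve fuel l = (PySem.Set.ofList (pvSpans l 0), pvTot l) := by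
  induction fuel generalizing l with
  | zero =>
    match l, h with
    | [], _ => simp [pvSolve, pvSpans, pvTot, PySem.Set.empty]
    | [m], h => simp at h
  | succ fuel ih =>
    match l with
    | [] => simp [pvSolve, pvSpans, pvTot, PySem.Set.empty]
    | [m] => simp [pvSolve, pvSpans, pvTot, PySem.Set.ofList]
    | a :: b :: rest =>
      have hlen : (a :: b :: rest).length = rest.length + 2 := by simp
      rw [pvSolve,
        ih _ (by simp only [List.length_take, hlen]; omega),
        ih _ (by simp only [List.length_drop, hlen]; omega)]
      refine Prod.ext ?_ ?_
      · rw [pvMerge, List.take_append_drop]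
      · exact pvTot_take_drop _ _

-- ===== VERDICT =====
theorem compute_target_spans_spec : Claim_equal_compute_target_spans := by
  intro morphemes _
  unfold Spec_compute_target_spans compute_target_spans compute_target_spans_alt
  rw [pvA_foldl, pvSolve_eq _ _ (le_refl _), PySem.Set.ofList_eq_foldl]
  rfl
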